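-- pv_equiv track=rewrite | github.com/rjs4013/class_algorithm | 0807_dfs_stack/programmers_stack_relearn.py | solution
-- ===== SOURCE A (Python) =====
-- def solution(progresses, speeds):
--     answer = []
--     len_pro = len(progresses)
--     stack = []
--
--     for i in range(len_pro):
--         day_work = progresses[i]
--         count_day = 0
--         while day_work < 100:
--             day_work += speeds[i]
--             count_day += 1
--
--         if not stack:
--             stack.append(count_day)
--
--         else:
--             if stack[-1] >= count_day:
--                 stack.append(count_day)
--
--             elif max(stack) < count_day:
--                 answer.append(len(stack))
--                 for j in range(len(stack)):
--                     stack.pop()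
--                 stack.append(count_day)
--             elif max(stack) > count_day > stack[-1]:
--                 stack.append(count_day)
--     answer.append(len(stack))
--
--
--     return answer
-- ===== SOURCE B (Python) =====
-- def _days(p, s):
--     return 0 if p >= 100 else (99 - p) // s + 1
--
-- def solution(progresses, speeds):
--     answer = []
--     leader = 0
--     size = 0
--     for i, p in enumerate(progresses):
--         d = 0 if p >= 100 else _days(p, speeds[i])
--         if size > 0 and d <= leader:
--             size += 1
--         else:
--             if size > 0:
--                 answer.append(size)
--             leader = d
--             size = 1
--     answer.append(size)
--     return answer
-- ===== Notes on version B (the rewrite author's own statement) =====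
-- stated objective: alternative
-- what changed: B replaces A's explicit stack (max(stack) rescans, a pop-all loop, and a step-by-step while-loop day counter) by a single pass keeping two scalars (the group's leading finish day and the group size) with each task's finish day obtained by ceiling division.
-- intended difference: On inputs where some task's finish day equals the maximum finish day so far while exceeding the previous task's finish day (e.g. progresses [95,97,95], speeds [1,1,1]: days [5,3,5]), none of A's branches fires and the task is silently dropped from the stack, so A undercounts that deployment group ([2]); B counts every task whose finish day does not exceed the group leader ([3]), the intended group size. — e.g. on solution([95, 97, 95], [1, 1, 1]): A returns [2], B returns [3]
import Mathlib
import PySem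

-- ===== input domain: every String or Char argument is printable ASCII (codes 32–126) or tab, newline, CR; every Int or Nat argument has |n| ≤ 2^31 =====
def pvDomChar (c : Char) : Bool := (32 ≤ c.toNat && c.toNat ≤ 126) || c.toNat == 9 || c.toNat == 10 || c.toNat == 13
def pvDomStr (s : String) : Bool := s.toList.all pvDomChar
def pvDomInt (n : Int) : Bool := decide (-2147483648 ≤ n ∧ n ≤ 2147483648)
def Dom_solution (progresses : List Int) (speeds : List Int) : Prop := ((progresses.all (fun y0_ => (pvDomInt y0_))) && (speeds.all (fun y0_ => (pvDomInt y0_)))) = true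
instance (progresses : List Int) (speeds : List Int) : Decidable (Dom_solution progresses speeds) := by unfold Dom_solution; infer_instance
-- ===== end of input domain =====

-- B replaces A's explicit stack (max() rescans, a pop-all loop, a step-by-step while
-- counter) by a single pass keeping two scalars (group leader, group size) with each
-- task's finish day obtained by ceiling division; where A silently drops a task
-- (finish day equal to the group maximum and above the stack top), B counts it.


-- ===== PORT A =====
-- 'while day_work < 100: day_work += speeds[i]; count_day += 1';
-- fuel (100 - day_work).toNat is enough whenever the Python loop terminates (speed ≥ 1)
def pvWhileA : Nat → Int → Int → Int → Int
  | 0, _, _, count_day => count_day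
  | fuel + 1, day_work, speed, count_day =>
      if day_work < 100 then pvWhileA fuel (day_work + speed) speed (count_day + 1)
      else count_day

-- max(stack); only ever applied to a nonempty stack
def pvMaxA (l : List Int) : Int := l.foldl max (l.headD 0)

-- stack is kept head-first (Python's stack[-1] is the head); the
-- 'for j in range(len(stack)): stack.pop()' loop empties the stack, then count_day
-- is appended, leaving [count_day]
def solution (progresses : List Int) (speeds : List Int) : List Int :=
  let len_pro := progresses.length
  let res := (List.range len_pro).foldl (fun (st : List Int × List Int) i =>
    let answer := st.1
    let stack := st.2
    let day_work := progresses.getD i 0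
    let count_day := pvWhileA (100 - day_work).toNat day_work (speeds.getD i 0) 0
    match stack with
    | [] => (answer, [count_day])
    | top :: _ =>
        if top ≥ count_day then (answer, count_day :: stack)
        else if pvMaxA stack < count_day then (answer ++ [(stack.length : Int)], [count_day])
        else if pvMaxA stack > count_day ∧ count_day > top then (answer, count_day :: stack)
        else (answer, stack)) ([], [])
  res.1 ++ [(res.2.length : Int)]

-- ===== PORT B =====
-- the number of days until a task at progress p with speed s finishes (ceiling division)
def pvDays (p : Int) (s : Int) : Int :=
  if p ≥ 100 then 0 else PySem.Int.floordiv (99 - p) s + 1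

-- state: (answer, leader, size); leader is meaningful only while size > 0
def solution_alt (progresses : List Int) (speeds : List Int) : List Int :=
  let res := (List.range progresses.length).foldl
    (fun (st : List Int × Int × Int) i =>
      let answer := st.1
      let leader := st.2.1
      let size := st.2.2
      let p := progresses.getD i 0
      let d : Int := if p ≥ 100 then 0 else pvDays p (speeds.getD i 0)
      if size > 0 ∧ d ≤ leader then (answer, leader, size + 1)
      else ((if size > 0 then answer ++ [size] else answer), d, 1)) ([], 0, 0)
  res.1 ++ [res.2.2]

-- ===== PRECONDITION & SPEC =====
-- Pre_ excludes exactly the inputs on which A does not return: an IndexError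
-- (speeds[i] missing for some task with progresses[i] < 100) or divergence
-- (speeds[i] ≤ 0 with progresses[i] < 100)
def Pre_solution (progresses : List Int) (speeds : List Int) : Prop :=
  ∀ i, i < progresses.length →
    (100 ≤ progresses.getD i 0 ∨ (i < speeds.length ∧ 0 < speeds.getD i 0))
instance (progresses : List Int) (speeds : List Int) : Decidable (Pre_solution progresses speeds) := by unfold Pre_solution; infer_instance

def pvWitness_solution : List Int × List Int := ([93, 30, 55], [1, 30, 5])

-- On inputs where some task's finish day equals the maximum finish day so far while
-- exceeding the previous task's finish day, none of A's branches fires and A silently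
-- drops that task from its stack, undercounting that deployment group; B counts every
-- task of the group, the intended tally of tasks deployed together.
-- (finish day of task i stated with Lean's Int division, which agrees with Python's
-- floor division for the positive speeds Pre_ guarantees)
def D_solution (progresses : List Int) (speeds : List Int) : Prop :=
  let f := fun i : Nat =>
    if progresses.getD i 0 < 100 then (99 - progresses.getD i 0) / speeds.getD i 0 + 1 else 0
  ∃ j < progresses.length,
    f (j - 1) < f j ∧ (∀ i < j, f i ≤ f j) ∧ (∃ i < j, f i = f j)
instance (progresses : List Int) (speeds : List Int) : Decidable (D_solution progresses speeds) := by unfold D_solution; infer_instance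

def Spec_solution (progresses : List Int) (speeds : List Int) (out : List Int) : Prop :=
  ¬ D_solution progresses speeds → out = solution_alt progresses speeds
instance (progresses : List Int) (speeds : List Int) (out : List Int) : Decidable (Spec_solution progresses speeds out) := by unfold Spec_solution; infer_instance

-- finish days [5, 3, 5]: the third task ties the group maximum, A drops it
def pvDiffWitness_solution : List Int × List Int := ([95, 97, 95], [1, 1, 1])
def pvDiffWitnessOut_solution : (List Int) × (List Int) := ([2], [3])

-- ===== CLAIM (what is proved, stated in full; the proofs are below) =====
def Claim_unchanged_solution : Prop := ∀ (progresses : List Int) (speeds : List Int), Dom_solution progresses speeds → Pre_solution progresses speeds → Spec_solution progresses speeds (solution progresses speeds)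
def Claim_changed_solution : Prop := Dom_solution (pvDiffWitness_solution.1) (pvDiffWitness_solution.2) ∧ Pre_solution (pvDiffWitness_solution.1) (pvDiffWitness_solution.2) ∧ D_solution (pvDiffWitness_solution.1) (pvDiffWitness_solution.2) ∧ solution (pvDiffWitness_solution.1) (pvDiffWitness_solution.2) = pvDiffWitnessOut_solution.1 ∧ solution_alt (pvDiffWitness_solution.1) (pvDiffWitness_solution.2) = pvDiffWitnessOut_solution.2 ∧ pvDiffWitnessOut_solution.1 ≠ pvDiffWitnessOut_solution.2
def Claim_exact_solution : Prop := ∀ (progresses : List Int) (speeds : List Int), Dom_solution progresses speeds → Pre_solution progresses speeds → D_solution progresses speeds → solution progresses speeds ≠ solution_alt progresses speeds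

-- ===== LEMMAS AND PROOFS =====

-- the while loop performs ceiling((100 - dw)/s) iterations when s ≥ 1 and has enough fuel
lemma pvWhileA_closed (s : Int) (hs : 0 < s) :
    ∀ (fuel : Nat) (dw c : Int), (100 - dw).toNat ≤ fuel →
      pvWhileA fuel dw s c =
        c + (if 100 ≤ dw then 0 else PySem.Int.floordiv (99 - dw) s + 1) := by
  intro fuel
  induction fuel with
  | zero =>
      intro dw c h
      have h1 : 100 ≤ dw := by omega
      simp [pvWhileA, h1]
  | succ n ih =>
      intro dw c h
      by_cases hdw : dw < 100
      · have step : pvWhileA (n + 1) dw s c = pvWhileA n (dw + s) s (c + 1) := by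
          simp [pvWhileA, hdw]
        rw [step, ih (dw + s) (c + 1) (by omega)]
        simp only [PySem.Int.floordiv_eq_ediv_of_pos hs]
        rw [if_neg (by omega : ¬ 100 ≤ dw)]
        by_cases h2 : 100 ≤ dw + s
        · have hz : (99 - dw) / s = 0 := Int.ediv_eq_zero_of_lt (by omega) (by omega)
          rw [if_pos h2, hz]; ring
        · rw [if_neg h2]
          have e1 : 99 - (dw + s) + 1 * s = 99 - dw := by ring
          have key := Int.add_mul_ediv_right (99 - (dw + s)) 1 (show s ≠ 0 by omega)
          rw [e1] at key
          rw [← key]; ring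
      · have step : pvWhileA (n + 1) dw s c = c := by
          simp [pvWhileA, hdw]
        rw [step, if_pos (by omega : (100:Int) ≤ dw)]; ring

-- per index: A's counted days equal the ceiling-division day count, under Pre_
lemma day_eq (progresses speeds : List Int) (hpre : Pre_solution progresses speeds)
    (i : Nat) (hi : i < progresses.length) :
    pvWhileA (100 - progresses.getD i 0).toNat (progresses.getD i 0) (speeds.getD i 0) 0 =
      (if progresses.getD i 0 ≥ 100 then 0
       else PySem.Int.floordiv (99 - progresses.getD i 0) (speeds.getD i 0) + 1) := by
  rcases hpre i hi with h | ⟨_, hs⟩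
  · have h0 : (100 - progresses.getD i 0).toNat = 0 := by omega
    rw [h0, if_pos (show progresses.getD i 0 ≥ 100 from h)]
    rfl
  · rw [pvWhileA_closed _ hs _ _ _ (le_refl _)]
    simp [ge_iff_le]

lemma pvMaxA_cons' (a x : Int) (l : List Int) :
    pvMaxA (a :: x :: l) = max a (pvMaxA (x :: l)) := by
  simp [pvMaxA, List.foldl_cons, max_self]
  exact (List.foldl_assoc (op := (max : Int → Int → Int)) (l := l) (a₁ := a) (a₂ := x))

lemma head_le_pvMaxA' (t : Int) (r : List Int) : t ≤ pvMaxA (t :: r) := by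
  simp [pvMaxA, max_self]
  exact (PySem.List.le_foldl_max r t).1

-- one step of A's loop / of B's loop / of the drop-detecting scan, for a day count d
def stepA (d : Int) (st : List Int × List Int) : List Int × List Int :=
  match st.2 with
  | [] => (st.1, [d])
  | top :: _ =>
      if top ≥ d then (st.1, d :: st.2)
      else if pvMaxA st.2 < d then (st.1 ++ [(st.2.length : Int)], [d])
      else if pvMaxA st.2 > d ∧ d > top then (st.1, d :: st.2)
      else (st.1, st.2)

def stepB (d : Int) (st : List Int × Int × Int) : List Int × Int × Int :=
  if st.2.2 > 0 ∧ d ≤ st.2.1 then (st.1, st.2.1, st.2.2 + 1)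
  else ((if st.2.2 > 0 then st.1 ++ [st.2.2] else st.1), d, 1)

def stepD (d : Int) (st : Option (Int × Int) × Bool) : Option (Int × Int) × Bool :=
  match st.1 with
  | none => (some (d, d), st.2)
  | some (leader, prev) =>
      if leader < d then (some (d, d), st.2)
      else if d = leader ∧ prev < d then (some (leader, prev), true)
      else (some (leader, d), st.2)

lemma stepD_true (d : Int) (st : Option (Int × Int) × Bool) (h : st.2 = true) :
    (stepD d st).2 = true := by
  rcases st with ⟨o, f⟩
  simp only at h
  subst h
  rcases o with _ | ⟨L, p⟩
  · rfl
  · simp only [stepD]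
    split_ifs <;> rfl

-- appending one element to each of two equally long lists cannot make them equal
-- unless both the lists and the elements were equal
lemma append_singleton_ne (la lb : List Int) (x y : Int) (hl : la.length = lb.length)
    (h : la ≠ lb ∨ x ≠ y) : la ++ [x] ≠ lb ++ [y] := by
  intro he
  obtain ⟨h1, h2⟩ := List.append_inj he hl
  rcases h with h | h
  · exact h h1
  · exact h (by simpa using h2)

-- the invariant linking A's (answer, stack), B's (answer, leader, size) and the scan:
-- in sync while no drop occurred; after a drop, A's stack is short of B's group size;
-- after the following flush, the answers differ at some position forever
def pvInvR (a : List Int × List Int) (b : List Int × Int × Int)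
    (c : Option (Int × Int) × Bool) : Prop :=
  (c.2 = false ∧ a.1 = b.1 ∧
    ((a.2 = [] ∧ b.2.2 = 0 ∧ c.1 = none) ∨
     (a.2 ≠ [] ∧ pvMaxA a.2 = b.2.1 ∧ (a.2.length : Int) = b.2.2 ∧ 0 < b.2.2 ∧
      c.1 = some (b.2.1, a.2.headD 0)))) ∨
  (c.2 = true ∧ a.1 = b.1 ∧ a.2 ≠ [] ∧ pvMaxA a.2 = b.2.1 ∧ (a.2.length : Int) < b.2.2) ∨
  (c.2 = true ∧ a.1.length = b.1.length ∧ a.1 ≠ b.1 ∧ a.2 ≠ [] ∧ pvMaxA a.2 = b.2.1 ∧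
    (a.2.length : Int) ≤ b.2.2 ∧ 0 < b.2.2)

lemma Inv_step (d : Int) (a : List Int × List Int) (b : List Int × Int × Int)
    (c : Option (Int × Int) × Bool) (h : pvInvR a b c) :
    pvInvR (stepA d a) (stepB d b) (stepD d c) := by
  obtain ⟨ansA, stA⟩ := a
  obtain ⟨ansB, L, sz⟩ := b
  obtain ⟨copt, flag⟩ := c
  have hDtrue : flag = true → (stepD d (copt, flag)).2 = true := fun hf =>
    stepD_true d (copt, flag) hf
  rcases h with ⟨hflag, hans, hrest⟩ | ⟨hflag, hans, hne, hmax, hlt⟩ |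
    ⟨hflag, hlen0, hansne, hne, hmax, hle, hpos⟩
  -- ===== in sync, no drop so far =====
  · simp only at hflag hans
    subst hflag; subst hans
    rcases hrest with ⟨he, hz, hc⟩ | ⟨hne, hmax, hlen, hpos, hc⟩
    · simp only at he hz hc
      subst he; subst hz; subst hc
      have eA : stepA d (ansA, []) = (ansA, [d]) := by simp [stepA]
      have eB : stepB d (ansA, L, 0) = (ansA, d, 1) := by simp [stepB]
      have eD : stepD d ((none : Option (Int × Int)), false) = (some (d, d), false) := by
        simp [stepD]
      rw [eA, eB, eD]
      exact Or.inl ⟨rfl, rfl, Or.inr ⟨by simp, by simp [pvMaxA], by simp, by simp, by simp⟩⟩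
    · match stA, hne with
      | t :: r, _ =>
        simp only [List.headD_cons] at hc
        simp only at hmax hlen hpos
        have hlen' : (r.length : Int) + 1 = sz := by rw [← hlen]; simp
        subst hc
        have htle : t ≤ L := hmax ▸ head_le_pvMaxA' t r
        by_cases h1 : t ≥ d
        · -- d ≤ top: both push / join
          have eA : stepA d (ansA, t :: r) = (ansA, d :: t :: r) := by simp [stepA, h1]
          have eB : stepB d (ansA, L, sz) = (ansA, L, sz + 1) := by
            simp only [stepB]; rw [if_pos ⟨hpos, by omega⟩]
          have eD : stepD d (some (L, t), false) = (some (L, d), false) := by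
            simp only [stepD]
            split_ifs with hA hB
            · exact absurd hA (by omega)
            · exact absurd hB.2 (by omega)
            · rfl
          rw [eA, eB, eD]
          refine Or.inl ⟨rfl, rfl, Or.inr ⟨by simp, ?_, ?_, by simp; omega, by simp⟩⟩
          · show pvMaxA (d :: t :: r) = L
            rw [pvMaxA_cons', hmax]; omega
          · show ((d :: t :: r).length : Int) = sz + 1
            simp; omega
        · have h1' : t < d := by omega
          by_cases h2 : pvMaxA (t :: r) < d
          · -- d > leader: both flush the group and restart
            have h2' : L < d := hmax ▸ h2
            have eA : stepA d (ansA, t :: r) = (ansA ++ [((t :: r).length : Int)], [d]) := by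
              simp [stepA, h1, h2]
            have eB : stepB d (ansA, L, sz) = (ansA ++ [sz], d, 1) := by
              simp only [stepB]
              rw [if_neg (by rintro ⟨-, h⟩; omega), if_pos hpos]
            have eD : stepD d (some (L, t), false) = (some (d, d), false) := by
              simp only [stepD]; rw [if_pos h2']
            rw [eA, eB, eD]
            refine Or.inl ⟨rfl, ?_, Or.inr ⟨by simp, by simp [pvMaxA], by simp, by simp, by simp⟩⟩
            show ansA ++ [((t :: r).length : Int)] = ansA ++ [sz]
            rw [hlen]
          · by_cases h3 : pvMaxA (t :: r) > d ∧ d > t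
            · -- leader > d > top: push / join
              have h3' : L > d := hmax ▸ h3.1
              have eA : stepA d (ansA, t :: r) = (ansA, d :: t :: r) := by
                simp [stepA, h1, h2, h3]
              have eB : stepB d (ansA, L, sz) = (ansA, L, sz + 1) := by
                simp only [stepB]; rw [if_pos ⟨hpos, by omega⟩]
              have eD : stepD d (some (L, t), false) = (some (L, d), false) := by
                simp only [stepD]
                split_ifs with hA hB
                · exact absurd hA (by omega)
                · exact absurd hB.1 (by omega)
                · rfl
              rw [eA, eB, eD]
              refine Or.inl ⟨rfl, rfl, Or.inr ⟨by simp, ?_, ?_, by simp; omega, by simp⟩⟩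
              · show pvMaxA (d :: t :: r) = L
                rw [pvMaxA_cons', hmax]; omega
              · show ((d :: t :: r).length : Int) = sz + 1
                simp; omega
            · -- d = leader > top: A drops the task, B joins it; deficit begins
              have hLd : L = d := by
                rw [hmax] at h2 h3; omega
              have eA : stepA d (ansA, t :: r) = (ansA, t :: r) := by
                simp [stepA, h1, h2, h3]
              have eB : stepB d (ansA, L, sz) = (ansA, L, sz + 1) := by
                simp only [stepB]; rw [if_pos ⟨hpos, by omega⟩]
              have eD : stepD d (some (L, t), false) = (some (L, t), true) := by
                simp only [stepD]
                rw [if_neg (by omega), if_pos ⟨by omega, h1'⟩]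
              rw [eA, eB, eD]
              exact Or.inr (Or.inl ⟨rfl, rfl, by simp, hmax, by simp; omega⟩)
  -- ===== deficit: a drop occurred, answers still equal, stack short of size =====
  · simp only at hflag hans hmax hlt
    subst hflag; subst hans
    match stA, hne with
    | t :: r, _ =>
      have hl : (r.length : Int) + 1 < sz := by
        have : ((t :: r).length : Int) = (r.length : Int) + 1 := by simp
        omega
      have hpos : (0 : Int) < sz := by omega
      have htle : t ≤ L := hmax ▸ head_le_pvMaxA' t r
      have hDflag := hDtrue rfl
      by_cases h1 : t ≥ d
      · have eA : stepA d (ansA, t :: r) = (ansA, d :: t :: r) := by simp [stepA, h1]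
        have eB : stepB d (ansA, L, sz) = (ansA, L, sz + 1) := by
          simp only [stepB]; rw [if_pos ⟨hpos, by omega⟩]
        rw [eA, eB]
        refine Or.inr (Or.inl ⟨hDflag, rfl, by simp, ?_, ?_⟩)
        · show pvMaxA (d :: t :: r) = L
          rw [pvMaxA_cons', hmax]; omega
        · show ((d :: t :: r).length : Int) < sz + 1
          simp; omega
      · have h1' : t < d := by omega
        by_cases h2 : pvMaxA (t :: r) < d
        · -- both flush: the appended group sizes differ; answers diverge
          have h2' : L < d := hmax ▸ h2
          have eA : stepA d (ansA, t :: r) = (ansA ++ [((t :: r).length : Int)], [d]) := by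
            simp [stepA, h1, h2]
          have eB : stepB d (ansA, L, sz) = (ansA ++ [sz], d, 1) := by
            simp only [stepB]
            rw [if_neg (by rintro ⟨-, h⟩; omega), if_pos hpos]
          rw [eA, eB]
          refine Or.inr (Or.inr ⟨hDflag, by simp, ?_, by simp, by simp [pvMaxA], by simp, by simp⟩)
          exact append_singleton_ne ansA ansA _ _ rfl (Or.inr (by simp; omega))
        · -- d ≤ leader: B joins; A pushes (d < leader) or drops again (d = leader)
          by_cases h3 : pvMaxA (t :: r) > d ∧ d > t
          · have eA : stepA d (ansA, t :: r) = (ansA, d :: t :: r) := by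
              simp [stepA, h1, h2, h3]
            have eB : stepB d (ansA, L, sz) = (ansA, L, sz + 1) := by
              simp only [stepB]; rw [if_pos ⟨hpos, by omega⟩]
            rw [eA, eB]
            refine Or.inr (Or.inl ⟨hDflag, rfl, by simp, ?_, ?_⟩)
            · show pvMaxA (d :: t :: r) = L
              rw [pvMaxA_cons', hmax]
              have : d < L := by rw [← hmax]; omega
              omega
            · show ((d :: t :: r).length : Int) < sz + 1
              simp; omega
          · have eA : stepA d (ansA, t :: r) = (ansA, t :: r) := by
              simp [stepA, h1, h2, h3]
            have eB : stepB d (ansA, L, sz) = (ansA, L, sz + 1) := by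
              have : d ≤ L := by rw [← hmax]; omega
              simp only [stepB]; rw [if_pos ⟨hpos, this⟩]
            rw [eA, eB]
            exact Or.inr (Or.inl ⟨hDflag, rfl, by simp, hmax, by
              show ((t :: r).length : Int) < sz + 1
              simp; omega⟩)
  -- ===== diverged: the answers already differ at some position =====
  · simp only at hflag hlen0 hansne hmax hle hpos
    subst hflag
    match stA, hne with
    | t :: r, _ =>
      have hl : (r.length : Int) + 1 ≤ sz := by
        have : ((t :: r).length : Int) = (r.length : Int) + 1 := by simp
        omega
      have htle : t ≤ L := hmax ▸ head_le_pvMaxA' t r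
      have hDflag := hDtrue rfl
      by_cases h1 : t ≥ d
      · have eA : stepA d (ansA, t :: r) = (ansA, d :: t :: r) := by simp [stepA, h1]
        have eB : stepB d (ansB, L, sz) = (ansB, L, sz + 1) := by
          simp only [stepB]; rw [if_pos ⟨hpos, by omega⟩]
        rw [eA, eB]
        refine Or.inr (Or.inr ⟨hDflag, hlen0, hansne, by simp, ?_, ?_, by simp; omega⟩)
        · show pvMaxA (d :: t :: r) = L
          rw [pvMaxA_cons', hmax]; omega
        · show ((d :: t :: r).length : Int) ≤ sz + 1
          simp; omega
      · have h1' : t < d := by omega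
        by_cases h2 : pvMaxA (t :: r) < d
        · have h2' : L < d := hmax ▸ h2
          have eA : stepA d (ansA, t :: r) = (ansA ++ [((t :: r).length : Int)], [d]) := by
            simp [stepA, h1, h2]
          have eB : stepB d (ansB, L, sz) = (ansB ++ [sz], d, 1) := by
            simp only [stepB]
            rw [if_neg (by rintro ⟨-, h⟩; omega), if_pos hpos]
          rw [eA, eB]
          refine Or.inr (Or.inr ⟨hDflag, by simp [hlen0], ?_, by simp, by simp [pvMaxA],
            by simp, by simp⟩)
          exact append_singleton_ne ansA ansB _ _ hlen0 (Or.inl hansne)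
        · by_cases h3 : pvMaxA (t :: r) > d ∧ d > t
          · have eA : stepA d (ansA, t :: r) = (ansA, d :: t :: r) := by
              simp [stepA, h1, h2, h3]
            have eB : stepB d (ansB, L, sz) = (ansB, L, sz + 1) := by
              simp only [stepB]; rw [if_pos ⟨hpos, by omega⟩]
            rw [eA, eB]
            refine Or.inr (Or.inr ⟨hDflag, hlen0, hansne, by simp, ?_, ?_, by simp; omega⟩)
            · show pvMaxA (d :: t :: r) = L
              rw [pvMaxA_cons', hmax]
              have : d < L := by rw [← hmax]; omega
              omega
            · show ((d :: t :: r).length : Int) ≤ sz + 1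
              simp; omega
          · have eA : stepA d (ansA, t :: r) = (ansA, t :: r) := by
              simp [stepA, h1, h2, h3]
            have eB : stepB d (ansB, L, sz) = (ansB, L, sz + 1) := by
              have : d ≤ L := by rw [← hmax]; omega
              simp only [stepB]; rw [if_pos ⟨hpos, this⟩]
            rw [eA, eB]
            exact Or.inr (Or.inr ⟨hDflag, hlen0, hansne, by simp, hmax, by
              show ((t :: r).length : Int) ≤ sz + 1
              simp; omega, by simp; omega⟩)

lemma Inv_fold (ds : Nat → Int) :
    ∀ (l : List Nat) (a : List Int × List Int) (b : List Int × Int × Int)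
      (c : Option (Int × Int) × Bool),
      pvInvR a b c →
      pvInvR (l.foldl (fun st i => stepA (ds i) st) a)
          (l.foldl (fun st i => stepB (ds i) st) b)
          (l.foldl (fun st i => stepD (ds i) st) c) := by
  intro l
  induction l with
  | nil => intro a b c h; exact h
  | cons x xs ih => intro a b c h; exact ih _ _ _ (Inv_step (ds x) a b c h)

-- running maximum of the finish days ds 0 .. ds n
def pvPM (ds : Nat → Int) : Nat → Int
  | 0 => ds 0
  | n + 1 => max (pvPM ds n) (ds (n + 1))

lemma pvPM_ub (ds : Nat → Int) : ∀ n, ∀ i ≤ n, ds i ≤ pvPM ds n := by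
  intro n
  induction n with
  | zero => intro i hi; interval_cases i; simp [pvPM]
  | succ m ih =>
      intro i hi
      rcases Nat.lt_succ_iff_lt_or_eq.mp (Nat.lt_succ_of_le hi) with h | h
      · exact le_trans (ih i (by omega)) (by simp [pvPM])
      · subst h; simp [pvPM]

lemma pvPM_attained (ds : Nat → Int) : ∀ n, ∃ i ≤ n, ds i = pvPM ds n := by
  intro n
  induction n with
  | zero => exact ⟨0, le_refl 0, rfl⟩
  | succ m ih =>
      rcases ih with ⟨i, hi, hieq⟩
      by_cases h : ds (m + 1) ≤ pvPM ds m
      · exact ⟨i, by omega, by simp [pvPM, max_eq_left h, hieq]⟩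
      · exact ⟨m + 1, le_refl _, by simp [pvPM]; omega⟩

-- the drop condition D_ states, for an abstract day function and a length
def pvDrop (ds : Nat → Int) (n : Nat) : Prop :=
  ∃ j < n, ds (j - 1) < ds j ∧ (∀ i < j, ds i ≤ ds j) ∧ (∃ i < j, ds i = ds j)

-- the scan's flag is set exactly when the drop condition occurs among the first n
-- days; while it is unset the scan state is (running maximum, previous day)
lemma scanD_iff (ds : Nat → Int) :
    ∀ n, (((List.range n).foldl (fun st i => stepD (ds i) st) (none, false)).2 = true
            ↔ pvDrop ds n) ∧
      (((List.range n).foldl (fun st i => stepD (ds i) st) (none, false)).2 = false →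
        0 < n → ((List.range n).foldl (fun st i => stepD (ds i) st) (none, false)).1
          = some (pvPM ds (n - 1), ds (n - 1))) := by
  intro n
  induction n with
  | zero =>
      refine ⟨⟨fun h => ?_, fun hD => ?_⟩, fun _ h => by omega⟩
      · simp [List.range_zero] at h
      · obtain ⟨j, hj, -⟩ := hD; omega
  | succ m ih =>
      have hsplit : (List.range (m + 1)).foldl (fun st i => stepD (ds i) st) (none, false)
          = stepD (ds m) ((List.range m).foldl (fun st i => stepD (ds i) st) (none, false)) := by
        rw [List.range_succ, List.foldl_append]
        rfl
      by_cases hf : ((List.range m).foldl (fun st i => stepD (ds i) st) (none, false)).2 = true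
      · have hDm : pvDrop ds m := (ih.1).mp hf
        have hT : ((List.range (m + 1)).foldl (fun st i => stepD (ds i) st) (none, false)).2
            = true := by
          rw [hsplit]; exact stepD_true _ _ hf
        refine ⟨⟨fun _ => ?_, fun _ => hT⟩, fun h _ => ?_⟩
        · obtain ⟨j, hj, hrest⟩ := hDm
          exact ⟨j, by omega, hrest⟩
        · rw [hT] at h; exact absurd h (by simp)
      · have hf' : ((List.range m).foldl (fun st i => stepD (ds i) st) (none, false)).2
            = false := by
          cases hb : ((List.range m).foldl (fun st i => stepD (ds i) st) (none, false)).2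
          · rfl
          · exact absurd hb hf
        have hndm : ¬ pvDrop ds m := fun hD => hf ((ih.1).mpr hD)
        rcases Nat.eq_zero_or_pos m with hm0 | hmpos
        · subst hm0
          have e : (List.range 1).foldl (fun st i => stepD (ds i) st) (none, false)
              = (some (ds 0, ds 0), false) := by
            simp [stepD]
          rw [e]
          refine ⟨⟨fun h => ?_, fun hD => ?_⟩, fun _ _ => by simp [pvPM]⟩
          · simp at h
          · obtain ⟨j, hj, -, -, i, hi, -⟩ := hD; omega
        · have hst := ih.2 hf' hmpos
          have hF : (List.range m).foldl (fun st i => stepD (ds i) st) (none, false)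
              = (some (pvPM ds (m - 1), ds (m - 1)), false) :=
            Prod.ext_iff.mpr ⟨hst, hf'⟩
          rw [hsplit, hF]
          by_cases hlead : pvPM ds (m - 1) < ds m
          · have e : stepD (ds m) (some (pvPM ds (m - 1), ds (m - 1)), false)
                = (some (ds m, ds m), false) := by
              simp only [stepD]; rw [if_pos hlead]
            rw [e]
            refine ⟨⟨fun h => by simp at h, ?_⟩, fun _ _ => ?_⟩
            · rintro ⟨j, hj, h1, h2, ⟨i0, hi0, hi0e⟩⟩
              rcases Nat.lt_succ_iff_lt_or_eq.mp hj with hjm | hjm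
              · exact absurd ⟨j, hjm, h1, h2, ⟨i0, hi0, hi0e⟩⟩ hndm
              · subst hjm
                have := pvPM_ub ds (j - 1) i0 (by omega)
                omega
            · have hpm : pvPM ds m = ds m := by
                have h1 : m = (m - 1) + 1 := by omega
                rw [h1, pvPM]
                rw [← h1]
                omega
              rw [show m + 1 - 1 = m from rfl, hpm]
          · by_cases hcnd : ds m = pvPM ds (m - 1) ∧ ds (m - 1) < ds m
            · have e : stepD (ds m) (some (pvPM ds (m - 1), ds (m - 1)), false)
                  = (some (pvPM ds (m - 1), ds (m - 1)), true) := by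
                simp only [stepD]; rw [if_neg hlead, if_pos hcnd]
              rw [e]
              refine ⟨⟨fun _ => ?_, fun _ => rfl⟩, fun h _ => by simp at h⟩
              obtain ⟨i0, hi0, hi0e⟩ := pvPM_attained ds (m - 1)
              refine ⟨m, by omega, hcnd.2, ?_, ⟨i0, by omega, by omega⟩⟩
              intro i' hi'
              have := pvPM_ub ds (m - 1) i' (by omega)
              omega
            · have e : stepD (ds m) (some (pvPM ds (m - 1), ds (m - 1)), false)
                  = (some (pvPM ds (m - 1), ds m), false) := by
                simp only [stepD]; rw [if_neg hlead, if_neg hcnd]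
              rw [e]
              refine ⟨⟨fun h => by simp at h, ?_⟩, fun _ _ => ?_⟩
              · rintro ⟨j, hj, h1, h2, ⟨i0, hi0, hi0e⟩⟩
                rcases Nat.lt_succ_iff_lt_or_eq.mp hj with hjm | hjm
                · exact absurd ⟨j, hjm, h1, h2, ⟨i0, hi0, hi0e⟩⟩ hndm
                · subst hjm
                  obtain ⟨i1, hi1, hi1e⟩ := pvPM_attained ds (j - 1)
                  have hub := pvPM_ub ds (j - 1) i0 (by omega)
                  have h2' := h2 i1 (by omega)
                  exact (hcnd ⟨by omega, h1⟩).elim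
              · have hpm : pvPM ds m = pvPM ds (m - 1) := by
                  have h1 : m = (m - 1) + 1 := by omega
                  rw [h1, pvPM]
                  rw [← h1]
                  obtain ⟨i1, hi1, hi1e⟩ := pvPM_attained ds (m - 1)
                  omega
                rw [show m + 1 - 1 = m from rfl, hpm]

-- the day counts D_solution speaks about are exactly B's, under Pre_
lemma D_iff_drop (progresses speeds : List Int) (hpre : Pre_solution progresses speeds) :
    D_solution progresses speeds ↔
      pvDrop (fun i => pvDays (progresses.getD i 0) (speeds.getD i 0)) progresses.length := by
  have hfd : ∀ i, i < progresses.length →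
      (if progresses.getD i 0 < 100
        then (99 - progresses.getD i 0) / speeds.getD i 0 + 1 else 0)
        = pvDays (progresses.getD i 0) (speeds.getD i 0) := by
    intro i hi
    rcases hpre i hi with h | ⟨_, hs⟩
    · rw [if_neg (by omega), pvDays, if_pos h]
    · rw [pvDays]
      by_cases h : progresses.getD i 0 ≥ 100
      · rw [if_neg (by omega), if_pos h]
      · rw [if_pos (by omega), if_neg h, PySem.Int.floordiv_eq_ediv_of_pos hs]
  unfold D_solution pvDrop
  beta_reduce
  constructor
  · rintro ⟨j, hj, h1, h2, ⟨i0, hi0, hi0e⟩⟩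
    refine ⟨j, hj, ?_, ?_, ⟨i0, hi0, ?_⟩⟩
    · rw [← hfd (j - 1) (by omega), ← hfd j (by omega)]; exact h1
    · intro i hi
      rw [← hfd i (by omega), ← hfd j (by omega)]
      exact h2 i hi
    · beta_reduce
      rw [← hfd i0 (by omega), ← hfd j (by omega)]; exact hi0e
  · rintro ⟨j, hj, h1, h2, ⟨i0, hi0, hi0e⟩⟩
    refine ⟨j, hj, ?_, ?_, ⟨i0, hi0, ?_⟩⟩
    · beta_reduce
      rw [hfd (j - 1) (by omega), hfd j (by omega)]; exact h1
    · intro i hi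
      beta_reduce
      rw [hfd i (by omega), hfd j (by omega)]
      exact h2 i hi
    · beta_reduce
      rw [hfd i0 (by omega), hfd j (by omega)]; exact hi0e

-- A's result, written over the abstract per-index step, under Pre_
lemma solution_run (progresses speeds : List Int) (hpre : Pre_solution progresses speeds) :
    solution progresses speeds =
      (let F := (List.range progresses.length).foldl
        (fun st i => stepA (pvDays (progresses.getD i 0) (speeds.getD i 0)) st) ([], [])
      F.1 ++ [(F.2.length : Int)]) := by
  unfold solution
  have hfoldA :
      (List.range progresses.length).foldl (fun (st : List Int × List Int) i =>
        let answer := st.1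
        let stack := st.2
        let day_work := progresses.getD i 0
        let count_day := pvWhileA (100 - day_work).toNat day_work (speeds.getD i 0) 0
        match stack with
        | [] => (answer, [count_day])
        | top :: _ =>
            if top ≥ count_day then (answer, count_day :: stack)
            else if pvMaxA stack < count_day then (answer ++ [(stack.length : Int)], [count_day])
            else if pvMaxA stack > count_day ∧ count_day > top then (answer, count_day :: stack)
            else (answer, stack)) ([], [])
      = (List.range progresses.length).foldl
          (fun st i => stepA (pvDays (progresses.getD i 0) (speeds.getD i 0)) st) ([], []) := by
    apply PySem.List.foldl_congr_mem
    intro st i hi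
    have hieq := day_eq progresses speeds hpre i (List.mem_range.mp hi)
    rcases st with ⟨ans, stk⟩
    simp only [pvDays, ← hieq]
    cases stk <;> simp [stepA]
  simp only [hfoldA]

-- B's result, written over the abstract per-index step
lemma solution_alt_run (progresses speeds : List Int) :
    solution_alt progresses speeds =
      (let F := (List.range progresses.length).foldl
        (fun st i => stepB (pvDays (progresses.getD i 0) (speeds.getD i 0)) st) ([], 0, 0)
      F.1 ++ [F.2.2]) := by
  unfold solution_alt
  have hfoldB :
      (List.range progresses.length).foldl
        (fun (st : List Int × Int × Int) i =>
          let answer := st.1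
          let leader := st.2.1
          let size := st.2.2
          let p := progresses.getD i 0
          let d : Int := if p ≥ 100 then 0 else pvDays p (speeds.getD i 0)
          if size > 0 ∧ d ≤ leader then (answer, leader, size + 1)
          else ((if size > 0 then answer ++ [size] else answer), d, 1)) ([], 0, 0)
      = (List.range progresses.length).foldl
          (fun st i => stepB (pvDays (progresses.getD i 0) (speeds.getD i 0)) st) ([], 0, 0) := by
    apply PySem.List.foldl_congr_mem
    intro st i _
    rcases st with ⟨ans, L, sz⟩
    have hd : (if progresses.getD i 0 ≥ 100 then (0 : Int)
        else pvDays (progresses.getD i 0) (speeds.getD i 0))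
        = pvDays (progresses.getD i 0) (speeds.getD i 0) := by
      simp only [pvDays]
      by_cases h : progresses.getD i 0 ≥ 100
      · rw [if_pos h, if_pos h]
      · rw [if_neg h, if_neg h]
    simp only [hd]
    simp [stepB]
  simp only [hfoldB]

-- the folded invariant at the end of the lists, under Pre_
lemma Inv_final (progresses speeds : List Int) :
    pvInvR ((List.range progresses.length).foldl
          (fun st i => stepA (pvDays (progresses.getD i 0) (speeds.getD i 0)) st) ([], []))
        ((List.range progresses.length).foldl
          (fun st i => stepB (pvDays (progresses.getD i 0) (speeds.getD i 0)) st) ([], 0, 0))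
        ((List.range progresses.length).foldl
          (fun st i => stepD (pvDays (progresses.getD i 0) (speeds.getD i 0)) st)
          (none, false)) :=
  Inv_fold _ (List.range progresses.length) ([], []) ([], 0, 0) (none, false)
    (Or.inl ⟨rfl, rfl, Or.inl ⟨rfl, rfl, rfl⟩⟩)

-- ===== VERDICT (by name: the statements are the Claim_ definitions above) =====
theorem solution_spec : Claim_unchanged_solution := by
  intro progresses speeds _ hpre
  unfold Spec_solution
  intro hnd
  rw [solution_run progresses speeds hpre, solution_alt_run progresses speeds]
  have hflag : ((List.range progresses.length).foldl
      (fun st i => stepD (pvDays (progresses.getD i 0) (speeds.getD i 0)) st)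
      (none, false)).2 = false := by
    cases hb : ((List.range progresses.length).foldl
      (fun st i => stepD (pvDays (progresses.getD i 0) (speeds.getD i 0)) st)
      (none, false)).2
    · rfl
    · exact absurd ((D_iff_drop progresses speeds hpre).mpr
        (((scanD_iff _ progresses.length).1).mp hb)) hnd
  rcases Inv_final progresses speeds with ⟨_, hans, hrest⟩ |
    ⟨hf, _, _, _, _⟩ | ⟨hf, _, _, _, _, _, _⟩
  · rcases hrest with ⟨he, hz, _⟩ | ⟨_, _, hlen, _, _⟩
    · simp only [hans, he, hz]; simp
    · simp only [hans, hlen]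
  · rw [hf] at hflag; cases hflag
  · rw [hf] at hflag; cases hflag

theorem solution_changed : Claim_changed_solution := by
  unfold Claim_changed_solution; decide

theorem solution_tight : Claim_exact_solution := by
  intro progresses speeds _ hpre hd
  rw [solution_run progresses speeds hpre, solution_alt_run progresses speeds]
  have hflag : ((List.range progresses.length).foldl
      (fun st i => stepD (pvDays (progresses.getD i 0) (speeds.getD i 0)) st)
      (none, false)).2 = true :=
    ((scanD_iff _ progresses.length).1).mpr ((D_iff_drop progresses speeds hpre).mp hd)
  rcases Inv_final progresses speeds with ⟨hf, _, _⟩ |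
    ⟨_, hans, _, _, hlt⟩ | ⟨_, hlen0, hansne, _, _, _, _⟩
  · rw [hf] at hflag; cases hflag
  · exact append_singleton_ne _ _ _ _ (by rw [hans]) (Or.inr (by omega))
  · exact append_singleton_ne _ _ _ _ hlen0 (Or.inl hansne)
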